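-- pv_equiv track=rewrite | github.com/AnshSharmaKumar01/generating_cricket_shot_explanations | src/utils/helpers.py | get_pose_bounding_box
-- ===== SOURCE A (Python) =====
-- from typing import Tuple, Dict
--
-- def get_pose_bounding_box(keypoints: Dict[str, Tuple[int, int]], padding: int = 100):
--     """
--     Calculate bounding box that contains all visible keypoints.
--     Args:
--         keypoints: Dictionary of joint_name -> (x, y)
--         padding: Extra pixels to include around the person
--     Returns:
--         (x_min, y_min, x_max, y_max)
--     """
--     xs = [pt[0] for pt in keypoints.values()]
--     ys = [pt[1] for pt in keypoints.values()]
--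
--     x_min = max(min(xs) - padding, 0)
--     y_min = max(min(ys) - padding, 0)
--     x_max = max(xs) + padding
--     y_max = max(ys) + padding
--
--     return int(x_min), int(y_min), int(x_max), int(y_max) + 55
-- ===== SOURCE B (Python) =====
-- def get_pose_bounding_box(keypoints, padding=100):
--     """Single fused pass over the keypoints, tracking all four extrema."""
--     it = iter(keypoints.values())
--     try:
--         x_min, y_min = next(it)
--     except StopIteration:
--         raise ValueError("keypoints is empty")
--     x_max, y_max = x_min, y_min
--     for x, y in it:
--         if x < x_min:
--             x_min = x
--         if x > x_max:
--             x_max = x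
--         if y < y_min:
--             y_min = y
--         if y > y_max:
--             y_max = y
--     return (int(max(x_min - padding, 0)), int(max(y_min - padding, 0)),
--             int(x_max + padding), int(y_max + padding) + 55)
-- ===== Notes on version B (the rewrite author's own statement) =====
-- stated objective: alternative
-- what changed: B replaces A's two list comprehensions plus four separate min/max passes with one fused loop seeded from the first keypoint that maintains x_min/x_max/y_min/y_max together.
import Mathlib
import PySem

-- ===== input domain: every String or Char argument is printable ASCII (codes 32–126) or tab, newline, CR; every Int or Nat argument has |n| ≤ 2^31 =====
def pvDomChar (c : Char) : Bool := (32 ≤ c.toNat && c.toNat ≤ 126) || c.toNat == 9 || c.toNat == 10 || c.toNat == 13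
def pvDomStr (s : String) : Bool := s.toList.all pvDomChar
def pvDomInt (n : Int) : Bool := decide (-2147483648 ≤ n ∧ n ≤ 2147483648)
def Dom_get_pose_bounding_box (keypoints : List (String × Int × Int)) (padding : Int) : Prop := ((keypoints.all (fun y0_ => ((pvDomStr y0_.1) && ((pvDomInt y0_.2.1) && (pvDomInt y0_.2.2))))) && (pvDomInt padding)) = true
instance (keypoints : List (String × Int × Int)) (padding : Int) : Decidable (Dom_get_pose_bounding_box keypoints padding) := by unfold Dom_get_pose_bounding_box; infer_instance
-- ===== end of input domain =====

-- B replaces A's list comprehensions + four min/max passes with one fused loop over the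
-- keypoints maintaining all four extrema (objective: alternative decomposition).

-- ===== PORT A =====
def get_pose_bounding_box (keypoints : List (String × Int × Int)) (padding : Int) : Int × Int × Int × Int :=
  let xs := keypoints.map (fun pt => pt.2.1)
  let ys := keypoints.map (fun pt => pt.2.2)
  match PySem.List.min? xs (fun v => v), PySem.List.min? ys (fun v => v),
        PySem.List.max? xs (fun v => v), PySem.List.max? ys (fun v => v) with
  | some mnx, some mny, some mxx, some mxy =>
      (max (mnx - padding) 0, max (mny - padding) 0, mxx + padding, mxy + padding + 55)
  | _, _, _, _ => (0, 0, 0, 0)  -- min([]) raises ValueError in Python; excluded by Pre_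

-- ===== PORT B =====
def bboxLoop : List (String × Int × Int) → Int → Int → Int → Int → Int × Int × Int × Int
  | [], xmn, ymn, xmx, ymx => (xmn, ymn, xmx, ymx)
  | (_, x, y) :: rest, xmn, ymn, xmx, ymx =>
      bboxLoop rest (if x < xmn then x else xmn) (if y < ymn then y else ymn)
                    (if x > xmx then x else xmx) (if y > ymx then y else ymx)

def get_pose_bounding_box_alt (keypoints : List (String × Int × Int)) (padding : Int) : Int × Int × Int × Int :=
  match keypoints with
  | [] => (0, 0, 0, 0)  -- Python B raises ValueError here; excluded by Pre_
  | (_, x0, y0) :: rest =>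
      let r := bboxLoop rest x0 y0 x0 y0
      (max (r.1 - padding) 0, max (r.2.1 - padding) 0, r.2.2.1 + padding, r.2.2.2 + padding + 55)

-- ===== PRECONDITION & SPEC =====
-- Pre_ excludes only the empty dict, on which A raises ValueError (min of empty sequence).
def Pre_get_pose_bounding_box (keypoints : List (String × Int × Int)) (padding : Int) : Prop := keypoints ≠ []
instance (keypoints : List (String × Int × Int)) (padding : Int) : Decidable (Pre_get_pose_bounding_box keypoints padding) := by unfold Pre_get_pose_bounding_box; infer_instance
def pvWitness_get_pose_bounding_box : (List (String × Int × Int)) × Int := ([("nose", 10, 20), ("hip", 30, 5)], 100)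

def Spec_get_pose_bounding_box (keypoints : List (String × Int × Int)) (padding : Int) (out : Int × Int × Int × Int) : Prop := out = get_pose_bounding_box_alt keypoints padding
instance (keypoints : List (String × Int × Int)) (padding : Int) (out : Int × Int × Int × Int) : Decidable (Spec_get_pose_bounding_box keypoints padding out) := by unfold Spec_get_pose_bounding_box; infer_instance

-- ===== CLAIM =====
def Claim_equal_get_pose_bounding_box : Prop := ∀ (keypoints : List (String × Int × Int)) (padding : Int), Dom_get_pose_bounding_box keypoints padding → Pre_get_pose_bounding_box keypoints padding → Spec_get_pose_bounding_box keypoints padding (get_pose_bounding_box keypoints padding)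

-- ===== LEMMAS AND PROOFS =====
lemma if_lt_eq_min (x a : Int) : (if x < a then x else a) = min a x := by
  split_ifs with h <;> omega

lemma if_gt_eq_max (x a : Int) : (if x > a then x else a) = max a x := by
  split_ifs with h <;> omega

lemma bboxLoop_eq_folds (rest : List (String × Int × Int)) :
    ∀ a b c d, bboxLoop rest a b c d =
      ((rest.map (fun pt => pt.2.1)).foldl min a,
       (rest.map (fun pt => pt.2.2)).foldl min b,
       (rest.map (fun pt => pt.2.1)).foldl max c,
       (rest.map (fun pt => pt.2.2)).foldl max d) := by
  induction rest with
  | nil => intro a b c d; rfl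
  | cons hd tl ih =>
      intro a b c d
      obtain ⟨n, x, y⟩ := hd
      simp only [bboxLoop, List.map_cons, List.foldl_cons,
        if_lt_eq_min, if_gt_eq_max, ih]

-- ===== VERDICT =====
theorem get_pose_bounding_box_spec : Claim_equal_get_pose_bounding_box := by
  intro keypoints padding _ hpre
  unfold Spec_get_pose_bounding_box
  match keypoints with
  | [] => exact absurd rfl hpre
  | (n0, x0, y0) :: rest =>
      simp only [get_pose_bounding_box, get_pose_bounding_box_alt, List.map_cons,
        PySem.List.min?_id_cons, PySem.List.max?_id_cons, bboxLoop_eq_folds]
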